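-- pv_equiv track=rewrite | github.com/postolka/AdventureOfCode2018 | 02/02.py | letter_sums
-- ===== SOURCE A (Python) =====
-- def letter_sums(box_id):
-- 	totals = {}
-- 	result = {}
-- 	for l in list(box_id):
-- 		if l in totals:
-- 			totals[l] += 1
-- 		else:
-- 			totals[l] = 1
--
-- 	for l, cnt in totals.items():
-- 		if cnt in result:
-- 			result[cnt] += 1
-- 		else:
-- 			result[cnt] = 1
--
-- 	return result
-- ===== SOURCE B (Python) =====
-- def letter_sums(box_id):
--     # recursive partition: peel off the first element's occurrences, recurse on the rest
--     def runs(xs):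
--         if not xs:
--             return []
--         head = xs[0]
--         rest = [x for x in xs if x != head]
--         return [(head, xs.count(head))] + runs(rest)
--     counts = [cnt for _, cnt in runs(list(box_id))]
--     return dict(runs(counts))
-- ===== Notes on version B (the rewrite author's own statement) =====
-- stated objective: alternative
-- what changed: Replaces A's two dict-accumulation passes with a recursive partition helper (take the first element, record its occurrence count, filter it out, recurse), applied first to the characters and then to the counts, building the result as an ordered pair list turned into a dict.
import Mathlib
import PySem

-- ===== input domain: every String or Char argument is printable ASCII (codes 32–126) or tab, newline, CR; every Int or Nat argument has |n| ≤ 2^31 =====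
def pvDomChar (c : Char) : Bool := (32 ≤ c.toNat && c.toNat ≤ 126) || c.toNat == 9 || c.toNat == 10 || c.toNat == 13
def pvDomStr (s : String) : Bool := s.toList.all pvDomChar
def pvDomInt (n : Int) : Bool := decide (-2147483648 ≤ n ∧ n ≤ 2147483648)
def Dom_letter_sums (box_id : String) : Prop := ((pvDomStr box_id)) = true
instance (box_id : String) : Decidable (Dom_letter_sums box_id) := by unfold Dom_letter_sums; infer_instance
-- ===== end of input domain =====

-- B replaces A's two accumulating dict passes by a recursive partition helper (peel off the
-- first element's occurrences, recurse on the remainder) applied twice; same return value.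


-- ===== PORT A =====
-- first loop: count letters into totals; second loop: tally counts; both "if key in dict" updates
def letter_sums (box_id : String) : List (Int × Int) :=
  ((box_id.toList.foldl (fun (t : PySem.Dict Char Int) l =>
      match t.get? l with
      | some v => t.insert l (v + 1)
      | none   => t.insert l 1) PySem.Dict.empty).items.foldl
    (fun (r : PySem.Dict Int Int) p =>
      match r.get? p.2 with
      | some v => r.insert p.2 (v + 1)
      | none   => r.insert p.2 1) PySem.Dict.empty).items

-- ===== PORT B =====
-- helper runs(xs): if xs empty -> []; else head = xs[0], rest = [x for x in xs if x != head],
-- [(head, xs.count(head))] + runs(rest)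
def pvRuns {α : Type} [DecidableEq α] : List α → List (α × Int)
  | [] => []
  | head :: tail =>
    (head, ((head :: tail).count head : Int)) ::
      pvRuns ((head :: tail).filter (fun x => x != head))
termination_by xs => xs.length
decreasing_by
  simp only [List.length_cons]
  calc (List.filter (fun x => x != head) (head :: tail)).length
      ≤ tail.length := by simp [List.filter, List.length_filter_le]
    _ < tail.length + 1 := Nat.lt_succ_self _

-- counts = [cnt for _, cnt in runs(list(box_id))]; return dict(runs(counts))
def letter_sums_alt (box_id : String) : List (Int × Int) :=
  (PySem.Dict.ofList (pvRuns ((pvRuns box_id.toList).map (fun p => p.2)))).items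

-- ===== PRECONDITION & SPEC =====
def Spec_letter_sums (box_id : String) (out : List (Int × Int)) : Prop := out = letter_sums_alt box_id
instance (box_id : String) (out : List (Int × Int)) : Decidable (Spec_letter_sums box_id out) := by unfold Spec_letter_sums; infer_instance

-- ===== CLAIM (what is proved, stated in full; the proofs are below) =====
def Claim_equal_letter_sums : Prop := ∀ (box_id : String), Dom_letter_sums box_id → Spec_letter_sums box_id (letter_sums box_id)

-- ===== LEMMAS AND PROOFS =====

-- set(filter(≠ h, t)) is discard(set(t), h)
theorem ofList_filter_ne {α : Type} [DecidableEq α] (t : List α) (h : α) :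
    PySem.Set.ofList (t.filter (fun x => x != h)) =
      PySem.Set.discard (PySem.Set.ofList t) h := by
  induction t with
  | nil => rfl
  | cons a t ih =>
    by_cases hah : a = h
    · subst hah
      have hd : PySem.Set.discard (PySem.Set.ofList (a :: t)) a
          = PySem.Set.discard (PySem.Set.ofList t) a := by
        show List.filter _ _ = _
        rw [PySem.Set.ofList_cons]
        show List.filter _ (a :: _) = _
        rw [List.filter_cons_of_neg (by simp)]
        show List.filter _ (List.filter _ _) = _
        rw [List.filter_filter]
        exact List.filter_congr (fun x _ => Bool.and_self _)
      rw [hd, ← ih]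
      congr 1
      rw [List.filter_cons_of_neg (by simp)]
    · rw [List.filter_cons_of_pos (by simp [hah]), PySem.Set.ofList_cons,
        PySem.Set.ofList_cons, ih]
      show _ = List.filter _ (a :: _)
      rw [List.filter_cons_of_pos (by simp [hah])]
      congr 1
      show List.filter _ (List.filter _ _) = List.filter _ (List.filter _ _)
      rw [List.filter_filter, List.filter_filter]
      exact List.filter_congr (fun x _ => Bool.and_comm _ _)

-- the partition recursion computes (unique elements in first-occurrence order, their counts)
theorem pvRuns_eq {α : Type} [DecidableEq α] (xs : List α) :
    pvRuns xs = (PySem.Set.ofList xs).map (fun k => (k, (xs.count k : Int))) := by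
  induction xs using pvRuns.induct with
  | case1 => simp [pvRuns]
  | case2 head tail ih =>
    rw [pvRuns, ih, PySem.Set.ofList_cons, List.map_cons]
    congr 1
    have hf : (head :: tail).filter (fun x => x != head) = tail.filter (fun x => x != head) := by
      rw [List.filter_cons_of_neg (by simp)]
    rw [hf, ofList_filter_ne]
    apply List.map_congr_left
    intro k hk
    have hkne : k ≠ head := by
      have h' := hk
      simp only [PySem.Set.discard, List.mem_filter] at h'
      simpa using h'.2
    have h1 : (tail.filter (fun x => x != head)).count k = tail.count k :=
      List.count_filter (by simp [hkne])
    have h2 : (head :: tail).count k = tail.count k :=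
      List.count_cons_of_ne (Ne.symm hkne)
    rw [h1, h2]

-- ===== VERDICT (by name: the statement is the Claim_ definition above) =====
theorem letter_sums_spec : Claim_equal_letter_sums := by
  intro box_id _
  unfold Spec_letter_sums letter_sums letter_sums_alt
  -- A phase 1: the totals fold is Dict.counter
  have h1 : box_id.toList.foldl (fun (t : PySem.Dict Char Int) x =>
      match t.get? x with
      | some v => t.insert x (v + 1)
      | none   => t.insert x 1) PySem.Dict.empty = PySem.Dict.counter box_id.toList := by
    rw [← PySem.Dict.foldl_insert_getD_add_one_eq_counter]
    apply PySem.List.foldl_congr_mem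
    intro d x _
    unfold PySem.Dict.getD
    cases h : d.get? x with
    | none => simp
    | some v => simp
  -- A phase 2: the result fold is Dict.counter of the list of counts
  have h2 : ∀ (l : List (Char × Int)),
      l.foldl (fun (r : PySem.Dict Int Int) p =>
        match r.get? p.2 with
        | some v => r.insert p.2 (v + 1)
        | none   => r.insert p.2 1) PySem.Dict.empty
      = PySem.Dict.counter (l.map (fun p => p.2)) := by
    intro l
    rw [← PySem.Dict.foldl_insert_getD_add_one_eq_counter, List.foldl_map]
    apply PySem.List.foldl_congr_mem
    intro d p _
    unfold PySem.Dict.getD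
    cases h : d.get? p.2 with
    | none => simp
    | some v => simp
  rw [h1, h2]
  -- B: runs gives the same counts list, and dict(runs(counts)) is counter(counts)
  set c : List Int := (PySem.Set.ofList box_id.toList).map
      (fun k => (box_id.toList.count k : Int)) with hc
  have hA : (PySem.Dict.counter box_id.toList).items.map (fun p => p.2) = c := by
    rw [PySem.Dict.items_counter, List.map_map]; rfl
  have hcB : (pvRuns box_id.toList).map (fun p => p.2) = c := by
    rw [pvRuns_eq, List.map_map]; rfl
  rw [hA, hcB, pvRuns_eq]
  -- dict built from fresh distinct keys: items are exactly the pair list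
  have hfold : PySem.Dict.ofList ((PySem.Set.ofList c).map (fun k => (k, (c.count k : Int))))
      = (PySem.Set.ofList c).foldl
          (fun (d : PySem.Dict Int Int) k => d.insert k ((c.count k : Int))) PySem.Dict.empty := by
    show List.foldl _ _ _ = _
    rw [List.foldl_map]
  rw [hfold]
  have hitems := PySem.Dict.items_foldl_insert_fresh (l := PySem.Set.ofList c)
      (k := fun a => a) (v := fun a => (c.count a : Int)) (d := PySem.Dict.empty)
      (by intro a _; simp [PySem.Dict.contains_empty])
      (by simp)
  rw [hitems, PySem.Dict.items_counter]
  simp [PySem.Dict.empty]
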